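-- pv_equiv track=rewrite | github.com/Melodiz/dailycode | Algorithms/some_intern_contests/tinkoff_winter/task_6/test.py | solve
-- ===== SOURCE A (Python) =====
-- def is_non_degenerate(p1, p2, p3):
--     return (p2[0] - p1[0]) * (p3[1] - p1[1]) != (p3[0] - p1[0]) * (p2[1] - p1[1])
--
-- def solve(n, points):
--     valid_triangles = []
--     for i in range(n):
--         for j in range(i+1, n):
--             for k in range(j+1, n):
--                 if is_non_degenerate(points[i], points[j], points[k]):
--                     valid_triangles.append((i, j, k))
--
--     def triangle_perimeter(t):
--         return sum(abs(points[t[i]][0] - points[t[j]][0]) + abs(points[t[i]][1] - points[t[j]][1])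
--                    for i, j in [(0,1), (1,2), (2,0)])
--
--     valid_triangles.sort(key=triangle_perimeter, reverse=True)
--
--     memo = {}
--     stack = [(0, 0, 0)]  # (index, used_mask, count)
--     max_count = 0
--
--     while stack:
--         index, used_mask, count = stack.pop()
--
--         if count > max_count:
--             max_count = count
--
--         if index == len(valid_triangles):
--             continue
--
--         state = (index, used_mask)
--         if state in memo and memo[state] >= count:
--             continue
--         memo[state] = count
--
--         current_triangle = valid_triangles[index]
--         triangle_mask = (1 << current_triangle[0]) | (1 << current_triangle[1]) | (1 << current_triangle[2])
--
--         if used_mask & triangle_mask == 0: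
--             stack.append((index + 1, used_mask | triangle_mask, count + 1))
--
--         stack.append((index + 1, used_mask, count))
--
--     return max_count
-- ===== SOURCE B (Python) =====
-- def solve(n, points):
--     masks = []
--     for i in range(n):
--         for j in range(i + 1, n):
--             for k in range(j + 1, n):
--                 (x1, y1), (x2, y2), (x3, y3) = points[i], points[j], points[k]
--                 if (x2 - x1) * (y3 - y1) != (x3 - x1) * (y2 - y1):
--                     masks.append((1 << i) | (1 << j) | (1 << k))
--     # dp maps a set of used vertices (bitmask) to the best count of
--     # disjoint triangles achieving exactly that used set.
--     dp = {0: 0}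
--     for t in masks:
--         for m, c in list(dp.items()):
--             if m & t == 0:
--                 nm = m | t
--                 if dp.get(nm, -1) < c + 1:
--                     dp[nm] = c + 1
--     return max(dp.values())
-- ===== Notes on version B (the rewrite author's own statement) =====
-- stated objective: faster
-- what changed: B drops A's perimeter sort and replaces A's explicit-stack DFS with an (index,used_mask)->count memo dict by a single forward pass over the triangle list maintaining one dict from used-vertex mask to the best disjoint-triangle count, returning the max of its values.
import Mathlib
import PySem

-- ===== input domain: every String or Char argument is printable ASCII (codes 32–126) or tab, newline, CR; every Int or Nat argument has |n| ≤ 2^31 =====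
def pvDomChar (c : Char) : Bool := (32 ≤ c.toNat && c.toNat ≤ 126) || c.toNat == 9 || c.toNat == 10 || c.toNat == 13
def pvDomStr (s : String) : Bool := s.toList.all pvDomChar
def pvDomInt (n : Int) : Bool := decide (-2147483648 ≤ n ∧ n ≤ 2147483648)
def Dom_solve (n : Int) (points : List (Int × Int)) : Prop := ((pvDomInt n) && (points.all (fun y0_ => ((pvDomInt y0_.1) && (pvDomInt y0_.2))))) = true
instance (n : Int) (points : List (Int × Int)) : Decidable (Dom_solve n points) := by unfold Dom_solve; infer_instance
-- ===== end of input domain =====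

-- B replaces A's explicit-stack DFS over the sorted triangle list with an index-free
-- forward DP (dict: used-vertex mask -> best disjoint-triangle count) and drops the sort.

-- ===== PORT A =====
def isNonDegenerate (p1 p2 p3 : Int × Int) : Bool :=
  (p2.1 - p1.1) * (p3.2 - p1.2) != (p3.1 - p1.1) * (p2.2 - p1.2)

def validTrianglesA (n : Int) (points : List (Int × Int)) : List (Int × Int × Int) :=
  (PySem.List.pyRange 0 n 1).flatMap fun i =>
    (PySem.List.pyRange (i+1) n 1).flatMap fun j =>
      (PySem.List.pyRange (j+1) n 1).filterMap fun k =>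
        if isNonDegenerate (PySem.List.pyGetD points i (0,0)) (PySem.List.pyGetD points j (0,0))
            (PySem.List.pyGetD points k (0,0)) then some (i, j, k) else none

def trianglePerimeter (points : List (Int × Int)) (t : Int × Int × Int) : Int :=
  let a := PySem.List.pyGetD points t.1 (0,0)
  let b := PySem.List.pyGetD points t.2.1 (0,0)
  let c := PySem.List.pyGetD points t.2.2 (0,0)
  ((a.1 - b.1).natAbs + (a.2 - b.2).natAbs : Int) + ((b.1 - c.1).natAbs + (b.2 - c.2).natAbs : Int)
    + ((c.1 - a.1).natAbs + (c.2 - a.2).natAbs : Int)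

def maskOf (t : Int × Int × Int) : Nat :=
  (1 <<< t.1.toNat) ||| (1 <<< t.2.1.toNat) ||| (1 <<< t.2.2.toNat)

def memoSkip (memo : PySem.Dict (Nat × Nat) Nat) (i m c : Nat) : Bool :=
  match memo.get? (i, m) with
  | some prev => decide (c ≤ prev)   -- state in memo and memo[state] >= count
  | none => false

-- the while-stack loop; returns the final (max_count, memo)
def loopA (tris : List (Int × Int × Int)) (stack : List (Nat × Nat × Nat))
    (memo : PySem.Dict (Nat × Nat) Nat) (maxc : Nat) : Nat × PySem.Dict (Nat × Nat) Nat :=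
  match stack with
  | [] => (maxc, memo)
  | (i, m, c) :: rest =>
    let maxc' := max maxc c
    if hi : i = tris.length then
      loopA tris rest memo maxc'
    else if memoSkip memo i m c then
      loopA tris rest memo maxc'
    else
      let memo' := memo.insert (i, m) c
      match ht : tris[i]? with
      | none => loopA tris rest memo' maxc'   -- unreachable: Python raises IndexError here
      | some t =>
        let tmask := maskOf t
        if m &&& tmask = 0 then
          loopA tris ((i+1, m, c) :: (i+1, m ||| tmask, c+1) :: rest) memo' maxc'
        else
          loopA tris ((i+1, m, c) :: rest) memo' maxc'
termination_by (stack.map (fun e => 3 ^ (tris.length + 1 - e.1))).sum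
decreasing_by
  · simp only [List.map_cons, List.sum_cons]
    have : 0 < 3 ^ (tris.length + 1 - i) := Nat.pow_pos (by norm_num)
    omega
  · simp only [List.map_cons, List.sum_cons]
    have : 0 < 3 ^ (tris.length + 1 - i) := Nat.pow_pos (by norm_num)
    omega
  · simp only [List.map_cons, List.sum_cons]
    have : 0 < 3 ^ (tris.length + 1 - i) := Nat.pow_pos (by norm_num)
    omega
  · have hlt : i < tris.length := by
      have := List.getElem?_eq_some_iff.mp ht
      exact this.1
    simp only [List.map_cons, List.sum_cons]
    have he : tris.length + 1 - i = (tris.length - i) + 1 := by omega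
    have h3 : 3 ^ (tris.length + 1 - i) = 3 * 3 ^ (tris.length + 1 - (i+1)) := by
      rw [he]
      have : tris.length + 1 - (i+1) = tris.length - i := by omega
      rw [this, pow_succ, Nat.mul_comm]
    have : 0 < 3 ^ (tris.length + 1 - (i+1)) := Nat.pow_pos (by norm_num)
    omega
  · have hlt : i < tris.length := by
      have := List.getElem?_eq_some_iff.mp ht
      exact this.1
    simp only [List.map_cons, List.sum_cons]
    have he : tris.length + 1 - i = (tris.length - i) + 1 := by omega
    have h3 : 3 ^ (tris.length + 1 - i) = 3 * 3 ^ (tris.length + 1 - (i+1)) := by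
      rw [he]
      have : tris.length + 1 - (i+1) = tris.length - i := by omega
      rw [this, pow_succ, Nat.mul_comm]
    have : 0 < 3 ^ (tris.length + 1 - (i+1)) := Nat.pow_pos (by norm_num)
    omega

def solve (n : Int) (points : List (Int × Int)) : Int :=
  let tris := PySem.List.sorted (validTrianglesA n points) (trianglePerimeter points) true
  ((loopA tris [(0, 0, 0)] PySem.Dict.empty 0).1 : Nat)

-- ===== PORT B =====
def validMasks (n : Int) (points : List (Int × Int)) : List Nat :=
  (PySem.List.pyRange 0 n 1).flatMap fun i =>
    (PySem.List.pyRange (i+1) n 1).flatMap fun j =>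
      (PySem.List.pyRange (j+1) n 1).filterMap fun k =>
        let p1 := PySem.List.pyGetD points i (0,0)
        let p2 := PySem.List.pyGetD points j (0,0)
        let p3 := PySem.List.pyGetD points k (0,0)
        if (p2.1 - p1.1) * (p3.2 - p1.2) != (p3.1 - p1.1) * (p2.2 - p1.2) then
          some ((1 <<< i.toNat) ||| (1 <<< j.toNat) ||| (1 <<< k.toNat))
        else none

-- dp.get(nm, -1) < c1  (values are counts ≥ 0, so a missing key always improves)
def improves (dp : PySem.Dict Nat Nat) (nm c1 : Nat) : Bool :=
  match dp.get? nm with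
  | some v => decide (v < c1)
  | none => true

-- one pass of B's inner loop: iterate over a snapshot of dp.items, improving dp
def innerB (t : Nat) (dp0 : PySem.Dict Nat Nat) : PySem.Dict Nat Nat :=
  dp0.items.foldl (fun dp p =>
    if p.1 &&& t = 0 then
      if improves dp (p.1 ||| t) (p.2 + 1) then dp.insert (p.1 ||| t) (p.2 + 1) else dp
    else dp) dp0

def solve_alt (n : Int) (points : List (Int × Int)) : Int :=
  let masks := validMasks n points
  let dp := masks.foldl (fun dp t => innerB t dp) (PySem.Dict.empty.insert 0 0)
  (((PySem.List.max? dp.values (fun v => v)).getD 0 : Nat) : Int)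

-- ===== PRECONDITION & SPEC =====
-- Pre_ excludes exactly the inputs where the Python raises IndexError: some triple
-- i < j < k < n exists (n ≥ 3) while an index up to n-1 is out of range (n > len(points)).
def Pre_solve (n : Int) (points : List (Int × Int)) : Prop :=
  n ≤ (points.length : Int) ∨ n ≤ 2
instance (n : Int) (points : List (Int × Int)) : Decidable (Pre_solve n points) := by
  unfold Pre_solve; infer_instance

def pvWitness_solve : Int × (List (Int × Int)) := (3, [(0,0),(1,0),(0,1)])

def Spec_solve (n : Int) (points : List (Int × Int)) (out : Int) : Prop := out = solve_alt n points
instance (n : Int) (points : List (Int × Int)) (out : Int) : Decidable (Spec_solve n points out) := by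
  unfold Spec_solve; infer_instance

-- ===== CLAIM (what is proved, stated in full; the proofs are below) =====
def Claim_equal_solve : Prop := ∀ (n : Int) (points : List (Int × Int)),
  Dom_solve n points → Pre_solve n points → Spec_solve n points (solve n points)

-- ===== LEMMAS AND PROOFS =====

-- the specification function: best number of pairwise-disjoint masks pickable from l, avoiding m
def fBest : List Nat → Nat → Nat
  | [], _ => 0
  | t :: ts, m => if m &&& t = 0 then max (fBest ts m) (fBest ts (m ||| t) + 1) else fBest ts m

lemma fBest_cons_skip_le (t : Nat) (ts : List Nat) (m : Nat) : fBest ts m ≤ fBest (t :: ts) m := by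
  by_cases h : m &&& t = 0
  · simp only [fBest, if_pos h]; exact le_max_left _ _
  · simp only [fBest, if_neg h]; exact le_refl _

lemma fBest_cons_take_le (t : Nat) (ts : List Nat) (m : Nat) (h : m &&& t = 0) :
    fBest ts (m ||| t) + 1 ≤ fBest (t :: ts) m := by
  simp only [fBest, if_pos h]; exact le_max_right _ _

lemma or_eq_zero_iff' (x y : Nat) : x ||| y = 0 ↔ x = 0 ∧ y = 0 := by
  constructor
  · intro h
    have h1 : x ≤ 0 := h ▸ Nat.left_le_or
    have h2 : y ≤ 0 := h ▸ Nat.right_le_or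
    omega
  · rintro ⟨rfl, rfl⟩; rfl

lemma or_and_eq_zero_iff (x y z : Nat) : (x ||| y) &&& z = 0 ↔ x &&& z = 0 ∧ y &&& z = 0 := by
  rw [Nat.and_comm, Nat.and_or_distrib_left, Nat.and_comm z x, Nat.and_comm z y, or_eq_zero_iff']

lemma fBest_perm {l l' : List Nat} (h : l.Perm l') : ∀ m, fBest l m = fBest l' m := by
  induction h with
  | nil => intro m; rfl
  | cons x _ ih =>
    intro m
    by_cases hx : m &&& x = 0 <;> simp only [fBest, if_pos, if_neg, hx, ih, if_true, if_false]
  | swap a b l =>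
    intro m
    by_cases hb : m &&& b = 0 <;> by_cases ha : m &&& a = 0
    · by_cases hab : a &&& b = 0
      · have h1 : (m ||| b) &&& a = 0 := (or_and_eq_zero_iff m b a).mpr ⟨ha, by rwa [Nat.and_comm]⟩
        have h2 : (m ||| a) &&& b = 0 := (or_and_eq_zero_iff m a b).mpr ⟨hb, hab⟩
        have hc : m ||| b ||| a = m ||| a ||| b := by
          rw [Nat.or_assoc, Nat.or_comm b a, Nat.or_assoc]
        simp only [fBest, if_pos ha, if_pos hb, if_pos h1, if_pos h2, hc]
        omega
      · have h1 : ¬ (m ||| b) &&& a = 0 := by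
          rw [or_and_eq_zero_iff]
          intro hcon
          exact hab (by rw [Nat.and_comm]; exact hcon.2)
        have h2 : ¬ (m ||| a) &&& b = 0 := by
          rw [or_and_eq_zero_iff]
          intro hcon
          exact hab hcon.2
        simp only [fBest, if_pos ha, if_pos hb, if_neg h1, if_neg h2]
        omega
    · have h1 : ¬ (m ||| b) &&& a = 0 := by
        rw [or_and_eq_zero_iff]
        intro hcon
        exact ha hcon.1
      simp only [fBest, if_pos hb, if_neg ha, if_neg h1]
    · have h2 : ¬ (m ||| a) &&& b = 0 := by
        rw [or_and_eq_zero_iff]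
        intro hcon
        exact hb hcon.1
      simp only [fBest, if_pos ha, if_neg hb, if_neg h2]
    · simp only [fBest, if_neg ha, if_neg hb]
  | trans _ _ ih1 ih2 =>
    intro m
    rw [ih1 m, ih2 m]

-- value of an A-side suffix state
def gval (tris : List (Int × Int × Int)) (i m : Nat) : Nat :=
  fBest ((tris.map maskOf).drop i) m

lemma gval_of_ge (tris : List (Int × Int × Int)) (i m : Nat) (h : tris.length ≤ i) :
    gval tris i m = 0 := by
  unfold gval
  rw [List.drop_eq_nil_of_le (by simpa using h)]
  rfl

lemma gval_succ (tris : List (Int × Int × Int)) (i m : Nat) (t : Int × Int × Int)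
    (ht : tris[i]? = some t) :
    gval tris i m = if m &&& maskOf t = 0
      then max (gval tris (i+1) m) (gval tris (i+1) (m ||| maskOf t) + 1)
      else gval tris (i+1) m := by
  have hlt : i < tris.length := (List.getElem?_eq_some_iff.mp ht).1
  have hlt' : i < (tris.map maskOf).length := by simpa using hlt
  unfold gval
  rw [List.drop_eq_getElem_cons hlt']
  have : (tris.map maskOf)[i] = maskOf t := by
    rw [List.getElem_map]
    congr 1
    have := (List.getElem?_eq_some_iff.mp ht).2
    simpa using this
  rw [this]
  rfl

-- unfold lemmas for loopA
lemma loopA_nil (tris : List (Int × Int × Int)) (memo : PySem.Dict (Nat × Nat) Nat) (maxc : Nat) :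
    loopA tris [] memo maxc = (maxc, memo) := by
  rw [loopA]

lemma loopA_cons_len (tris : List (Int × Int × Int)) (i m c : Nat) (rest : List (Nat × Nat × Nat))
    (memo : PySem.Dict (Nat × Nat) Nat) (maxc : Nat) (hi : i = tris.length) :
    loopA tris ((i,m,c) :: rest) memo maxc = loopA tris rest memo (max maxc c) := by
  rw [loopA]; simp [hi]

lemma loopA_cons_skip (tris : List (Int × Int × Int)) (i m c : Nat) (rest : List (Nat × Nat × Nat))
    (memo : PySem.Dict (Nat × Nat) Nat) (maxc : Nat) (hi : i ≠ tris.length)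
    (hs : memoSkip memo i m c = true) :
    loopA tris ((i,m,c) :: rest) memo maxc = loopA tris rest memo (max maxc c) := by
  rw [loopA]; simp [hi, hs]

lemma loopA_cons_none (tris : List (Int × Int × Int)) (i m c : Nat) (rest : List (Nat × Nat × Nat))
    (memo : PySem.Dict (Nat × Nat) Nat) (maxc : Nat) (hi : i ≠ tris.length)
    (hs : memoSkip memo i m c = false) (ht : tris[i]? = none) :
    loopA tris ((i,m,c) :: rest) memo maxc
      = loopA tris rest (memo.insert (i,m) c) (max maxc c) := by
  rw [loopA]; simp only [dif_neg hi, hs, Bool.false_eq_true, if_false]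
  split <;> simp_all

lemma loopA_cons_take (tris : List (Int × Int × Int)) (i m c : Nat) (rest : List (Nat × Nat × Nat))
    (memo : PySem.Dict (Nat × Nat) Nat) (maxc : Nat) (t : Int × Int × Int)
    (hi : i ≠ tris.length) (hs : memoSkip memo i m c = false) (ht : tris[i]? = some t)
    (hd : m &&& maskOf t = 0) :
    loopA tris ((i,m,c) :: rest) memo maxc
      = loopA tris ((i+1, m, c) :: (i+1, m ||| maskOf t, c+1) :: rest)
          (memo.insert (i,m) c) (max maxc c) := by
  rw [loopA]; simp only [dif_neg hi, hs, Bool.false_eq_true, if_false]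
  split <;> simp_all

lemma loopA_cons_notake (tris : List (Int × Int × Int)) (i m c : Nat) (rest : List (Nat × Nat × Nat))
    (memo : PySem.Dict (Nat × Nat) Nat) (maxc : Nat) (t : Int × Int × Int)
    (hi : i ≠ tris.length) (hs : memoSkip memo i m c = false) (ht : tris[i]? = some t)
    (hd : ¬ m &&& maskOf t = 0) :
    loopA tris ((i,m,c) :: rest) memo maxc
      = loopA tris ((i+1, m, c) :: rest) (memo.insert (i,m) c) (max maxc c) := by
  rw [loopA]; simp only [dif_neg hi, hs, Bool.false_eq_true, if_false]
  split <;> simp_all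

def wSum (tris : List (Int × Int × Int)) (xs : List (Nat × Nat × Nat)) : Nat :=
  (xs.map (fun e => 3 ^ (tris.length + 1 - e.1))).sum

lemma pow3_pos (k : Nat) : 0 < 3 ^ k := Nat.pow_pos (by norm_num)

lemma wSum_cons (tris : List (Int × Int × Int)) (i m c : Nat) (xs : List (Nat × Nat × Nat)) :
    wSum tris ((i, m, c) :: xs) = 3 ^ (tris.length + 1 - i) + wSum tris xs := by
  unfold wSum; simp

lemma pow3_split (tris : List (Int × Int × Int)) (i : Nat) (hlt : i < tris.length) :
    3 ^ (tris.length + 1 - i) = 3 * 3 ^ (tris.length + 1 - (i+1)) := by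
  have he : tris.length + 1 - i = (tris.length + 1 - (i+1)) + 1 := by omega
  rw [he, pow_succ, Nat.mul_comm]

lemma loopA_append_aux (tris : List (Int × Int × Int)) :
    ∀ (N : Nat) (xs ys : List (Nat × Nat × Nat)) (memo : PySem.Dict (Nat × Nat) Nat) (maxc : Nat),
    wSum tris xs ≤ N →
    loopA tris (xs ++ ys) memo maxc
      = loopA tris ys (loopA tris xs memo maxc).2 (loopA tris xs memo maxc).1 := by
  intro N
  induction N with
  | zero =>
    intro xs ys memo maxc hN
    cases xs with
    | nil => rw [loopA_nil]; rfl
    | cons e xs' =>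
      exfalso
      rw [wSum_cons] at hN
      have := pow3_pos (tris.length + 1 - e.1)
      omega
  | succ N ih =>
    intro xs ys memo maxc hN
    cases xs with
    | nil => rw [loopA_nil]; rfl
    | cons e xs' =>
      obtain ⟨i, m, c⟩ := e
      rw [wSum_cons] at hN
      have hw1 := pow3_pos (tris.length + 1 - i)
      by_cases hi : i = tris.length
      · rw [List.cons_append, loopA_cons_len tris i m c _ memo maxc hi,
          loopA_cons_len tris i m c _ memo maxc hi]
        exact ih xs' ys memo (max maxc c) (by omega)
      · by_cases hs : memoSkip memo i m c = true
        · rw [List.cons_append, loopA_cons_skip tris i m c _ memo maxc hi hs,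
            loopA_cons_skip tris i m c _ memo maxc hi hs]
          exact ih xs' ys memo (max maxc c) (by omega)
        · have hs' : memoSkip memo i m c = false := by simpa using hs
          cases ht : tris[i]? with
          | none =>
            rw [List.cons_append, loopA_cons_none tris i m c _ memo maxc hi hs' ht,
              loopA_cons_none tris i m c _ memo maxc hi hs' ht]
            exact ih xs' ys (memo.insert (i,m) c) (max maxc c) (by omega)
          | some t =>
            have hlt : i < tris.length := (List.getElem?_eq_some_iff.mp ht).1
            have h3 := pow3_split tris i hlt
            have hw2 := pow3_pos (tris.length + 1 - (i+1))
            by_cases hd : m &&& maskOf t = 0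
            · rw [List.cons_append, loopA_cons_take tris i m c _ memo maxc t hi hs' ht hd,
                loopA_cons_take tris i m c _ memo maxc t hi hs' ht hd]
              have := ih ((i+1, m, c) :: (i+1, m ||| maskOf t, c+1) :: xs') ys
                (memo.insert (i,m) c) (max maxc c)
                (by rw [wSum_cons, wSum_cons]; omega)
              simpa using this
            · rw [List.cons_append, loopA_cons_notake tris i m c _ memo maxc t hi hs' ht hd,
                loopA_cons_notake tris i m c _ memo maxc t hi hs' ht hd]
              have := ih ((i+1, m, c) :: xs') ys (memo.insert (i,m) c) (max maxc c)
                (by rw [wSum_cons]; omega)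
              simpa using this

lemma loopA_append (tris : List (Int × Int × Int)) :
    ∀ (xs ys : List (Nat × Nat × Nat)) (memo : PySem.Dict (Nat × Nat) Nat) (maxc : Nat),
    loopA tris (xs ++ ys) memo maxc
      = loopA tris ys (loopA tris xs memo maxc).2 (loopA tris xs memo maxc).1 := by
  intro xs ys memo maxc
  exact loopA_append_aux tris (wSum tris xs) xs ys memo maxc le_rfl

-- MAIN: value + memo behaviour of processing a single state on top of an empty stack
lemma loopA_single (tris : List (Int × Int × Int)) :
    ∀ (d i m c : Nat) (memo : PySem.Dict (Nat × Nat) Nat) (maxc : Nat),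
    d = tris.length + 1 - i →
    (∀ k v, memo.get? k = some v → i ≤ k.1 → v + gval tris k.1 k.2 ≤ maxc) →
    (loopA tris [(i,m,c)] memo maxc).1 = max maxc (c + gval tris i m)
    ∧ (∀ k, k.1 < i → (loopA tris [(i,m,c)] memo maxc).2.get? k = memo.get? k)
    ∧ (∀ k v, (loopA tris [(i,m,c)] memo maxc).2.get? k = some v → i ≤ k.1 →
        v + gval tris k.1 k.2 ≤ max maxc (c + gval tris i m)) := by
  intro d
  induction d using Nat.strong_induction_on with
  | _ d IH =>
    intro i m c memo maxc hd hpre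
    by_cases hi : i = tris.length
    · rw [loopA_cons_len tris i m c [] memo maxc hi, loopA_nil]
      have hg : gval tris i m = 0 := gval_of_ge tris i m (by omega)
      refine ⟨by simp [hg], fun k _ => rfl, fun k v hv hik => ?_⟩
      have := hpre k v hv hik
      simp only [hg]
      omega
    · by_cases hs : memoSkip memo i m c = true
      · obtain ⟨prev, hprev, hcle⟩ : ∃ prev, memo.get? (i, m) = some prev ∧ c ≤ prev := by
          unfold memoSkip at hs
          cases hm : memo.get? (i, m) with
          | none => rw [hm] at hs; simp at hs
          | some p => rw [hm] at hs; exact ⟨p, rfl, by simpa using hs⟩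
        have hmain : prev + gval tris i m ≤ maxc := hpre (i, m) prev hprev le_rfl
        rw [loopA_cons_skip tris i m c [] memo maxc hi hs, loopA_nil]
        refine ⟨by omega, fun k _ => rfl, fun k v hv hik => ?_⟩
        have := hpre k v hv hik
        omega
      · have hs' : memoSkip memo i m c = false := by simpa using hs
        have hpre' : ∀ k v, (memo.insert (i, m) c).get? k = some v → i + 1 ≤ k.1 →
            v + gval tris k.1 k.2 ≤ max maxc c := by
          intro k v hv hik
          have hk : k ≠ (i, m) := by
            intro h; subst h; simp at hik
          rw [PySem.Dict.get?_insert_of_ne _ _ hk] at hv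
          have := hpre k v hv (by omega)
          omega
        have hins : ∀ k, k.1 < i → (memo.insert (i, m) c).get? k = memo.get? k := by
          intro k hk
          exact PySem.Dict.get?_insert_of_ne _ _ (by intro h; subst h; simp at hk)
        cases ht : tris[i]? with
        | none =>
          rw [loopA_cons_none tris i m c [] memo maxc hi hs' ht, loopA_nil]
          have hlen : tris.length ≤ i := by
            have := List.getElem?_eq_none_iff.mp ht
            omega
          have hg : gval tris i m = 0 := gval_of_ge tris i m hlen
          refine ⟨by simp [hg], hins, fun k v hv hik => ?_⟩
          by_cases hk : k = (i, m)
          · subst hk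
            rw [PySem.Dict.get?_insert_self] at hv
            have hvc : v = c := by simpa using hv.symm
            rw [hvc]
            show c + gval tris i m ≤ max maxc (c + gval tris i m)
            exact le_max_right _ _
          · rw [PySem.Dict.get?_insert_of_ne _ _ hk] at hv
            have := hpre k v hv hik
            omega
        | some t =>
          have hlt : i < tris.length := (List.getElem?_eq_some_iff.mp ht).1
          have hd1 : tris.length + 1 - (i+1) < d := by omega
          by_cases hdj : m &&& maskOf t = 0
          · rw [loopA_cons_take tris i m c [] memo maxc t hi hs' ht hdj]
            have hsplit : ((i+1, m, c) :: (i+1, m ||| maskOf t, c+1) :: ([] : List (Nat × Nat × Nat)))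
                = [(i+1, m, c)] ++ [(i+1, m ||| maskOf t, c+1)] := rfl
            rw [hsplit, loopA_append]
            obtain ⟨h1v, h1p, h1s⟩ := IH _ hd1 (i+1) m c (memo.insert (i, m) c) (max maxc c) rfl hpre'
            set r1 := loopA tris [(i+1, m, c)] (memo.insert (i, m) c) (max maxc c) with hr1
            obtain ⟨h2v, h2p, h2s⟩ := IH _ hd1 (i+1) (m ||| maskOf t) (c+1) r1.2 r1.1 rfl
              (by intro k v hv hik; have := h1s k v hv hik; rw [h1v]; omega)
            set r2 := loopA tris [(i+1, m ||| maskOf t, c+1)] r1.2 r1.1 with hr2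
            have hgv : gval tris i m
                = max (gval tris (i+1) m) (gval tris (i+1) (m ||| maskOf t) + 1) := by
              rw [gval_succ tris i m t ht, if_pos hdj]
            refine ⟨?_, ?_, ?_⟩
            · rw [h2v, h1v, hgv]; omega
            · intro k hk
              rw [h2p k (by omega), h1p k (by omega), hins k hk]
            · intro k v hv hik
              by_cases hk1 : i + 1 ≤ k.1
              · have hthis := h2s k v hv hk1
                rw [h1v] at hthis
                rw [hgv]
                omega
              · have hki : k.1 = i := by omega
                rw [h2p k (by omega), h1p k (by omega)] at hv
                by_cases hk : k = (i, m)
                · subst hk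
                  rw [PySem.Dict.get?_insert_self] at hv
                  have hvc : v = c := by simpa using hv.symm
                  rw [hvc]
                  show c + gval tris i m ≤ max maxc (c + gval tris i m)
                  exact le_max_right _ _
                · rw [PySem.Dict.get?_insert_of_ne _ _ hk] at hv
                  have := hpre k v hv hik
                  omega
          · rw [loopA_cons_notake tris i m c [] memo maxc t hi hs' ht hdj]
            obtain ⟨h1v, h1p, h1s⟩ := IH _ hd1 (i+1) m c (memo.insert (i, m) c) (max maxc c) rfl hpre'
            have hgv : gval tris i m = gval tris (i+1) m := by
              rw [gval_succ tris i m t ht, if_neg hdj]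
            refine ⟨?_, ?_, ?_⟩
            · rw [h1v, hgv]; omega
            · intro k hk
              rw [h1p k (by omega), hins k hk]
            · intro k v hv hik
              by_cases hk1 : i + 1 ≤ k.1
              · have hthis := h1s k v hv hk1
                rw [hgv]
                omega
              · have hki : k.1 = i := by omega
                rw [h1p k (by omega)] at hv
                by_cases hk : k = (i, m)
                · subst hk
                  rw [PySem.Dict.get?_insert_self] at hv
                  have hvc : v = c := by simpa using hv.symm
                  rw [hvc]
                  show c + gval tris i m ≤ max maxc (c + gval tris i m)
                  exact le_max_right _ _
                · rw [PySem.Dict.get?_insert_of_ne _ _ hk] at hv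
                  have := hpre k v hv hik
                  omega

lemma loopA_spec (tris : List (Int × Int × Int)) :
    (loopA tris [(0,0,0)] PySem.Dict.empty 0).1 = fBest (tris.map maskOf) 0 := by
  have h := loopA_single tris (tris.length + 1) 0 0 0 PySem.Dict.empty 0 rfl
    (by intro k v hv _; rw [PySem.Dict.get?_empty] at hv; exact absurd hv (by simp))
  have := h.1
  rw [this]
  unfold gval
  simp

-- A's triangle list, mapped to masks, is B's mask list
lemma map_maskOf_validTriangles (n : Int) (points : List (Int × Int)) :
    (validTrianglesA n points).map maskOf = validMasks n points := by
  unfold validTrianglesA validMasks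
  rw [List.map_flatMap]
  apply List.flatMap_congr
  intro i _
  rw [List.map_flatMap]
  apply List.flatMap_congr
  intro j _
  rw [List.map_filterMap]
  apply List.filterMap_congr
  intro k _
  simp only [isNonDegenerate]
  split <;> simp [maskOf]

-- ===== B-side lemmas =====
def listMax (l : List Nat) : Nat := l.foldl max 0

lemma foldl_max_init_le (l : List Nat) (a : Nat) : a ≤ l.foldl max a := by
  induction l generalizing a with
  | nil => simp
  | cons x xs ih => simpa using le_trans (Nat.le_max_left a x) (ih (max a x))

lemma le_foldl_max_of_mem {l : List Nat} {x : Nat} (h : x ∈ l) (a : Nat) : x ≤ l.foldl max a := by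
  induction l generalizing a with
  | nil => cases h
  | cons y ys ih =>
    rcases List.mem_cons.mp h with rfl | h'
    · exact le_trans (Nat.le_max_right a x) (foldl_max_init_le ys _)
    · exact ih h' _
lemma foldl_max_le {l : List Nat} {a b : Nat} (ha : a ≤ b) (h : ∀ x ∈ l, x ≤ b) :
    l.foldl max a ≤ b := by
  induction l generalizing a with
  | nil => simpa using ha
  | cons x xs ih =>
    simp only [List.foldl_cons]
    exact ih (max_le ha (h x (by simp))) (fun y hy => h y (by simp [hy]))

lemma listMax_le {l : List Nat} {b : Nat} (h : ∀ x ∈ l, x ≤ b) : listMax l ≤ b :=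
  foldl_max_le (Nat.zero_le b) h

lemma le_listMax_of_mem {l : List Nat} {x : Nat} (h : x ∈ l) : x ≤ listMax l :=
  le_foldl_max_of_mem h 0

lemma foldl_inv {σ α : Type} (f : σ → α → σ) (P : σ → Prop) (l : List α) (s : σ)
    (h0 : P s) (hstep : ∀ s x, x ∈ l → P s → P (f s x)) : P (l.foldl f s) := by
  induction l generalizing s with
  | nil => exact h0
  | cons x xs ih =>
    exact ih (f s x) (hstep s x (by simp) h0) (fun s' y hy => hstep s' y (by simp [hy]))

def itemsMax (dp : PySem.Dict Nat Nat) (ts : List Nat) : Nat :=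
  listMax (dp.items.map (fun p => p.2 + fBest ts p.1))

-- the step function of B's inner loop
def stepB (t : Nat) (dp : PySem.Dict Nat Nat) (p : Nat × Nat) : PySem.Dict Nat Nat :=
  if p.1 &&& t = 0 then
    if improves dp (p.1 ||| t) (p.2 + 1) then dp.insert (p.1 ||| t) (p.2 + 1) else dp
  else dp

lemma innerB_eq_foldl (t : Nat) (dp : PySem.Dict Nat Nat) :
    innerB t dp = dp.items.foldl (stepB t) dp := rfl

lemma stepB_cases (t : Nat) (dp : PySem.Dict Nat Nat) (p : Nat × Nat) :
    stepB t dp p = dp ∨ (p.1 &&& t = 0 ∧ improves dp (p.1 ||| t) (p.2 + 1) = true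
      ∧ stepB t dp p = dp.insert (p.1 ||| t) (p.2 + 1)) := by
  unfold stepB
  by_cases hdj : p.1 &&& t = 0
  · by_cases hc : improves dp (p.1 ||| t) (p.2 + 1) = true
    · exact Or.inr ⟨hdj, hc, by rw [if_pos hdj, if_pos hc]⟩
    · left; rw [if_pos hdj, if_neg hc]
  · left; rw [if_neg hdj]

lemma stepB_nodup (t : Nat) (dp : PySem.Dict Nat Nat) (p : Nat × Nat) (h : dp.keys.Nodup) :
    (stepB t dp p).keys.Nodup := by
  rcases stepB_cases t dp p with he | ⟨_, _, he⟩ <;> rw [he]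
  · exact h
  · exact PySem.Dict.nodup_keys_insert _ _ _ h

lemma innerB_nodup (t : Nat) (dp : PySem.Dict Nat Nat) (h : dp.keys.Nodup) :
    (innerB t dp).keys.Nodup := by
  rw [innerB_eq_foldl]
  exact foldl_inv (stepB t) (fun d => d.keys.Nodup) dp.items dp h
    (fun d p _ hd => stepB_nodup t d p hd)

-- values at existing keys never decrease through a step
lemma stepB_mono (t : Nat) (dp : PySem.Dict Nat Nat) (p : Nat × Nat) (k v : Nat)
    (h : dp.get? k = some v) : ∃ w, (stepB t dp p).get? k = some w ∧ v ≤ w := by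
  rcases stepB_cases t dp p with he | ⟨hdj, hc, he⟩ <;> rw [he]
  · exact ⟨v, h, le_rfl⟩
  · by_cases hk : k = p.1 ||| t
    · subst hk
      rw [PySem.Dict.get?_insert_self]
      refine ⟨p.2 + 1, rfl, ?_⟩
      unfold improves at hc
      rw [h] at hc
      simp at hc
      omega
    · rw [PySem.Dict.get?_insert_of_ne _ _ hk]
      exact ⟨v, h, le_rfl⟩

lemma foldl_stepB_mono (t : Nat) (l : List (Nat × Nat)) :
    ∀ (dp : PySem.Dict Nat Nat) (k v : Nat), dp.get? k = some v →
    ∃ w, (l.foldl (stepB t) dp).get? k = some w ∧ v ≤ w := by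
  induction l with
  | nil => intro dp k v h; exact ⟨v, h, le_rfl⟩
  | cons p l' ih =>
    intro dp k v h
    obtain ⟨w, hw, hvw⟩ := stepB_mono t dp p k v h
    obtain ⟨w', hw', hww'⟩ := ih (stepB t dp p) k w hw
    exact ⟨w', hw', le_trans hvw hww'⟩

-- the take-update gets established when the snapshot element is processed
lemma foldl_stepB_estab (t : Nat) (l : List (Nat × Nat)) :
    ∀ (dp : PySem.Dict Nat Nat) (q : Nat × Nat), q ∈ l → q.1 &&& t = 0 →
    ∃ w, (l.foldl (stepB t) dp).get? (q.1 ||| t) = some w ∧ q.2 + 1 ≤ w := by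
  induction l with
  | nil => intro _ _ h; cases h
  | cons p l' ih =>
    intro dp q hq hdj
    rcases List.mem_cons.mp hq with rfl | hq'
    · have hstep : ∃ w, (stepB t dp q).get? (q.1 ||| t) = some w ∧ q.2 + 1 ≤ w := by
        unfold stepB
        rw [if_pos hdj]
        by_cases hc : improves dp (q.1 ||| t) (q.2 + 1) = true
        · rw [if_pos hc, PySem.Dict.get?_insert_self]
          exact ⟨q.2 + 1, rfl, le_rfl⟩
        · rw [if_neg hc]
          unfold improves at hc
          cases hg : dp.get? (q.1 ||| t) with
          | none => rw [hg] at hc; simp at hc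
          | some v =>
            rw [hg] at hc
            simp at hc
            exact ⟨v, rfl, by omega⟩
      obtain ⟨w, hw, hle⟩ := hstep
      simp only [List.foldl_cons]
      obtain ⟨w', hw', hww'⟩ := foldl_stepB_mono t l' (stepB t dp q) (q.1 ||| t) w hw
      exact ⟨w', hw', le_trans hle hww'⟩
    · simp only [List.foldl_cons]
      exact ih (stepB t dp p) q hq' hdj

-- provenance: every item of innerB t dp comes from dp, unchanged or as a take-update
lemma innerB_prov (t : Nat) (dp : PySem.Dict Nat Nat) :
    ∀ p ∈ (innerB t dp).items,
      p ∈ dp.items ∨ ∃ q ∈ dp.items, q.1 &&& t = 0 ∧ p = (q.1 ||| t, q.2 + 1) := by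
  rw [innerB_eq_foldl]
  refine foldl_inv (stepB t) (fun d => ∀ p ∈ d.items,
    p ∈ dp.items ∨ ∃ q ∈ dp.items, q.1 &&& t = 0 ∧ p = (q.1 ||| t, q.2 + 1)) dp.items dp
    (fun p hp => Or.inl hp) ?_
  intro d x hx hd p hp
  rcases stepB_cases t d x with he | ⟨hdj, _, he⟩
  · rw [he] at hp
    exact hd p hp
  · rw [he] at hp
    rcases (PySem.Dict.mem_items_insert _ _ _ _).mp hp with rfl | ⟨hpd, _⟩
    · exact Or.inr ⟨x, hx, hdj, rfl⟩
    · exact hd p hpd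

lemma innerB_itemsMax (t : Nat) (dp : PySem.Dict Nat Nat) (ts : List Nat) (h : dp.keys.Nodup) :
    itemsMax (innerB t dp) ts = itemsMax dp (t :: ts) := by
  apply Nat.le_antisymm
  · apply listMax_le
    intro x hx
    obtain ⟨p, hp, rfl⟩ := List.mem_map.mp hx
    rcases innerB_prov t dp p hp with hpd | ⟨q, hq, hdj, rfl⟩
    · calc p.2 + fBest ts p.1 ≤ p.2 + fBest (t :: ts) p.1 := by
            have := fBest_cons_skip_le t ts p.1; omega
        _ ≤ itemsMax dp (t :: ts) :=
            le_listMax_of_mem (List.mem_map.mpr ⟨p, hpd, rfl⟩)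
    · calc (q.1 ||| t, q.2 + 1).2 + fBest ts (q.1 ||| t, q.2 + 1).1
          = q.2 + 1 + fBest ts (q.1 ||| t) := rfl
        _ ≤ q.2 + fBest (t :: ts) q.1 := by
            have := fBest_cons_take_le t ts q.1 hdj; omega
        _ ≤ itemsMax dp (t :: ts) :=
            le_listMax_of_mem (List.mem_map.mpr ⟨q, hq, rfl⟩)
  · apply listMax_le
    intro x hx
    obtain ⟨q, hq, rfl⟩ := List.mem_map.mp hx
    have hget : dp.get? q.1 = some q.2 := by
      have : (q.1, q.2) ∈ dp.items := by simpa using hq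
      exact PySem.Dict.get?_of_mem_items _ this h
    have hskip : q.2 + fBest ts q.1 ≤ itemsMax (innerB t dp) ts := by
      obtain ⟨w, hw, hle⟩ := foldl_stepB_mono t dp.items dp q.1 q.2 hget
      have hmem : (q.1, w) ∈ (innerB t dp).items := by
        rw [innerB_eq_foldl]
        exact PySem.Dict.mem_items_of_get?_eq_some _ hw
      have hlm := le_listMax_of_mem (l := (innerB t dp).items.map (fun p => p.2 + fBest ts p.1))
        (List.mem_map.mpr ⟨(q.1, w), hmem, rfl⟩)
      simp only at hlm
      unfold itemsMax
      omega
    by_cases hdj : q.1 &&& t = 0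
    · have htake : q.2 + 1 + fBest ts (q.1 ||| t) ≤ itemsMax (innerB t dp) ts := by
        obtain ⟨w, hw, hle⟩ := foldl_stepB_estab t dp.items dp q hq hdj
        have hmem : (q.1 ||| t, w) ∈ (innerB t dp).items := by
          rw [innerB_eq_foldl]
          exact PySem.Dict.mem_items_of_get?_eq_some _ hw
        have hlm := le_listMax_of_mem (l := (innerB t dp).items.map (fun p => p.2 + fBest ts p.1))
          (List.mem_map.mpr ⟨(q.1 ||| t, w), hmem, rfl⟩)
        simp only at hlm
        unfold itemsMax
        omega
      simp only [fBest, if_pos hdj]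
      omega
    · simp only [fBest, if_neg hdj]
      omega

lemma foldl_innerB_itemsMax (masks : List Nat) :
    ∀ (dp : PySem.Dict Nat Nat), dp.keys.Nodup →
    itemsMax (masks.foldl (fun dp t => innerB t dp) dp) [] = itemsMax dp masks := by
  induction masks with
  | nil => intro dp _; rfl
  | cons t ms ih =>
    intro dp h
    simp only [List.foldl_cons]
    rw [ih (innerB t dp) (innerB_nodup t dp h), innerB_itemsMax t dp ms h]

lemma foldl_innerB_keys_zero (masks : List Nat) :
    ∀ (dp : PySem.Dict Nat Nat), 0 ∈ dp.keys →
    0 ∈ (masks.foldl (fun dp t => innerB t dp) dp).keys := by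
  induction masks with
  | nil => intro dp h; exact h
  | cons t ms ih =>
    intro dp h
    simp only [List.foldl_cons]
    refine ih (innerB t dp) ?_
    rw [innerB_eq_foldl]
    refine foldl_inv (stepB t) (fun d => 0 ∈ d.keys) dp.items dp h ?_
    intro d x _ hd
    rcases stepB_cases t d x with he | ⟨_, _, he⟩ <;> rw [he]
    · exact hd
    · exact (PySem.Dict.mem_keys_insert _ _ _ _).mpr (Or.inr hd)
  
lemma itemsMax_nil_eq_values (dp : PySem.Dict Nat Nat) :
    itemsMax dp [] = listMax dp.values := by
  unfold itemsMax
  congr 1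

lemma solve_alt_spec (n : Int) (points : List (Int × Int)) :
    solve_alt n points = (fBest (validMasks n points) 0 : Int) := by
  show (((PySem.List.max? ((validMasks n points).foldl (fun dp t => innerB t dp)
      (PySem.Dict.empty.insert 0 0)).values (fun v => v)).getD 0 : Nat) : Int) = _
  set dpF := (validMasks n points).foldl (fun dp t => innerB t dp) (PySem.Dict.empty.insert 0 0)
    with hdpF
  have hnodup0 : (PySem.Dict.empty.insert (0:Nat) (0:Nat)).keys.Nodup := by decide
  have hkey0 : (0:Nat) ∈ (PySem.Dict.empty.insert (0:Nat) (0:Nat)).keys := by decide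
  have hmax : itemsMax dpF [] = fBest (validMasks n points) 0 := by
    rw [hdpF, foldl_innerB_itemsMax _ _ hnodup0]
    unfold itemsMax
    have hitems : (PySem.Dict.empty.insert (0:Nat) (0:Nat)).items = [(0, 0)] := by decide
    rw [hitems]
    show listMax [0 + fBest (validMasks n points) 0] = _
    unfold listMax
    simp
  have hne : dpF.values ≠ [] := by
    have h0 : (0:Nat) ∈ dpF.keys := by
      rw [hdpF]
      exact foldl_innerB_keys_zero _ _ hkey0
    intro hcon
    have : dpF.items = [] := by
      cases hi : dpF.items with
      | nil => rfl
      | cons a l =>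
        exfalso
        have : dpF.values = dpF.items.map (·.2) := rfl
        rw [hi] at this
        rw [this] at hcon
        simp at hcon
    have hkeys : dpF.keys = dpF.items.map (·.1) := rfl
    rw [this] at hkeys
    rw [hkeys] at h0
    simp at h0
  cases hv : dpF.values with
  | nil => exact absurd hv hne
  | cons v vs =>
    rw [PySem.List.max?_id_cons]
    have h2 : listMax dpF.values = fBest (validMasks n points) 0 := by
      rw [← itemsMax_nil_eq_values, hmax]
    rw [hv] at h2
    unfold listMax at h2
    simp only [List.foldl_cons, Nat.zero_max] at h2
    simp only [Option.getD_some]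
    rw [h2]

-- ===== VERDICT (by name: the statement is the Claim_ definition above) =====
theorem solve_spec : Claim_equal_solve := by
  intro n points _ _
  unfold Spec_solve
  show ((loopA (PySem.List.sorted (validTrianglesA n points) (trianglePerimeter points) true)
      [(0,0,0)] PySem.Dict.empty 0).1 : Int) = solve_alt n points
  rw [loopA_spec]
  rw [solve_alt_spec]
  rw [fBest_perm ((PySem.List.sorted_perm _ _ _).map maskOf) 0]
  rw [map_maskOf_validTriangles]
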